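-- pv_equiv track=rewrite | github.com/DoktorTa/StrangeExpiriens | Python/ScriptingLanguage_C_Part/TaskC/Task21.py | dekart_mul
-- ===== SOURCE A (Python) =====
-- def dekart_mul(iter_1, iter_2):
--     for i in range(len(iter_1)):
--         j = 0
--         z = i
--         for k in range(2 * i + 1):
--             try:
--                 if z > j:
--                     yield iter_1[j] * iter_2[z]
--                     j += 1
--                 else:
--                     yield iter_1[j] * iter_2[z]
--                     z -= 1
--             except:
--                 pass
-- ===== SOURCE B (Python) =====
-- def dekart_mul(iter_1, iter_2):
--     # One flat counter t over the min(len1,len2)-square grid: cell number t lies in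
--     # L-shell i (largest i with i*i <= t, tracked via the next shell boundary nxt),
--     # at in-shell position p = t - i*i; p <= i decodes to the column-leg cell (p, i),
--     # otherwise to the row-leg cell (i, 2*i - p).  No nested loops, no pointers,
--     # no exception handling.
--     n = min(len(iter_1), len(iter_2))
--     i = 0
--     nxt = 1
--     for t in range(n * n):
--         if t == nxt:
--             i += 1
--             nxt = (i + 1) * (i + 1)
--         p = t - i * i
--         if p <= i:
--             yield iter_1[p] * iter_2[i]
--         else:
--             yield iter_1[i] * iter_2[2 * i - p]
-- ===== Notes on version B (the rewrite author's own statement) =====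
-- stated objective: alternative
-- what changed: B replaces A's nested per-diagonal pointer dance (j/z with a bare try/except freezing failed rows) by one flat counter over the min(len1,len2)-square grid that decodes each position arithmetically into its L-shell cell (shell index tracked via the next square boundary), with no inner loop, no index pointers and no exception handling.
import Mathlib
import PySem

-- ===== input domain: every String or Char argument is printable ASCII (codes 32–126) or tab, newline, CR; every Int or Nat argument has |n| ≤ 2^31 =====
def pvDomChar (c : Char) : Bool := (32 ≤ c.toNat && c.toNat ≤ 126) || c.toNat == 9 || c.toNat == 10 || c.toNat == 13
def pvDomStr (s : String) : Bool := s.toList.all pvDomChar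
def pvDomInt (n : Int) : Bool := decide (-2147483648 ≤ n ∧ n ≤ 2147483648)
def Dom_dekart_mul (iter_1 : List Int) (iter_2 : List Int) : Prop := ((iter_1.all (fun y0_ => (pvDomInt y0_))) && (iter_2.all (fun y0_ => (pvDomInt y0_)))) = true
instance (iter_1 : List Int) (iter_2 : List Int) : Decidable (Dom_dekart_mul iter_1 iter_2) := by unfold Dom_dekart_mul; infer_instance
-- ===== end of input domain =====

-- B replaces A's nested pointer-dance loop with try/except by one flat counter over
-- the min-square grid with arithmetic L-shell decoding (objective: alternative).


-- ===== PORT A =====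
-- one step of A's inner loop; state = (yielded so far, j, z); the bare
-- `except: pass` = if either index access fails (pyGet? = none), state unchanged
def dekartStep (iter_1 : List Int) (iter_2 : List Int)
    (st : List Int × Int × Int) : List Int × Int × Int :=
  if st.2.2 > st.2.1 then
    match PySem.List.pyGet? iter_1 st.2.1, PySem.List.pyGet? iter_2 st.2.2 with
    | some x, some y => (st.1 ++ [x * y], st.2.1 + 1, st.2.2)
    | _, _ => st
  else
    match PySem.List.pyGet? iter_1 st.2.1, PySem.List.pyGet? iter_2 st.2.2 with
    | some x, some y => (st.1 ++ [x * y], st.2.1, st.2.2 - 1)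
    | _, _ => st

def dekart_mul (iter_1 : List Int) (iter_2 : List Int) : List Int :=
  (List.range iter_1.length).foldl (fun acc i =>
    ((List.range (2 * i + 1)).foldl (fun st _ => dekartStep iter_1 iter_2 st)
      (acc, (0 : Int), (i : Int))).1) []

-- ===== PORT B =====
-- one step of B's flat loop; state = (yielded so far, current shell i, next shell boundary nxt)
def dkStep (iter_1 : List Int) (iter_2 : List Int)
    (st : List Int × Nat × Nat) (t : Nat) : List Int × Nat × Nat :=
  let i := if t = st.2.2 then st.2.1 + 1 else st.2.1
  let nxt := if t = st.2.2 then (i + 1) * (i + 1) else st.2.2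
  let p := t - i * i
  if p ≤ i then
    (st.1 ++ [PySem.List.pyGetD iter_1 (p : Int) 0 * PySem.List.pyGetD iter_2 (i : Int) 0], i, nxt)
  else
    (st.1 ++ [PySem.List.pyGetD iter_1 (i : Int) 0 * PySem.List.pyGetD iter_2 ((2 * i - p : Nat) : Int) 0], i, nxt)

def dekart_mul_alt (iter_1 : List Int) (iter_2 : List Int) : List Int :=
  ((List.range (min iter_1.length iter_2.length * min iter_1.length iter_2.length)).foldl
    (dkStep iter_1 iter_2) ([], 0, 1)).1

-- ===== PRECONDITION & SPEC =====
def Spec_dekart_mul (iter_1 : List Int) (iter_2 : List Int) (out : List Int) : Prop := out = dekart_mul_alt iter_1 iter_2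
instance (iter_1 : List Int) (iter_2 : List Int) (out : List Int) : Decidable (Spec_dekart_mul iter_1 iter_2 out) := by unfold Spec_dekart_mul; infer_instance

-- ===== CLAIM (what is proved, stated in full; the proofs are below) =====
def Claim_equal_dekart_mul : Prop := ∀ (iter_1 : List Int) (iter_2 : List Int), Dom_dekart_mul iter_1 iter_2 → Spec_dekart_mul iter_1 iter_2 (dekart_mul iter_1 iter_2)

-- ===== LEMMAS AND PROOFS =====

-- what one emitted product of shell q at in-shell position p is
def dkEmit (a b : List Int) (q p : Nat) : Int :=
  if p ≤ q then a.getD p 0 * b.getD q 0 else a.getD q 0 * b.getD (2 * q - p) 0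

-- the two legs of shell q (A's emission order for a live diagonal)
def dkLegs (a b : List Int) (q : Nat) : List Int :=
  (List.range (q + 1)).map (fun m => a.getD m 0 * b.getD q 0) ++
    (List.range q).reverse.map (fun k => a.getD q 0 * b.getD k 0)

-- a foldl that ignores the list elements is an iterate
theorem dk_foldl_const {α β : Type} (f : β → β) (l : List α) (s : β) :
    l.foldl (fun st _ => f st) s = f^[l.length] s := by
  induction l generalizing s with
  | nil => rfl
  | cons x xs ih => simp [List.foldl_cons, ih, Function.iterate_succ_apply]

-- foldl congruence on members
theorem dk_foldl_congr {α β : Type} (l : List α) (f g : β → α → β) (s : β)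
    (h : ∀ acc x, x ∈ l → f acc x = g acc x) : l.foldl f s = l.foldl g s := by
  induction l generalizing s with
  | nil => rfl
  | cons x xs ih =>
    rw [List.foldl_cons, List.foldl_cons, h s x List.mem_cons_self]
    exact ih _ (fun acc y hy => h acc y (List.mem_cons_of_mem x hy))

-- flatMap congruence on members
theorem dk_flatMap_congr {α β : Type} (l : List α) (f g : α → List β)
    (h : ∀ x, x ∈ l → f x = g x) : l.flatMap f = l.flatMap g := by
  induction l with
  | nil => rfl
  | cons x xs ih =>
    rw [List.flatMap_cons, List.flatMap_cons, h x List.mem_cons_self]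
    exact congrArg _ (ih (fun y hy => h y (List.mem_cons_of_mem x hy)))

-- frozen row: if iter_2 is too short, the first access of row i fails and the
-- state never changes again
theorem dk_frozen (a b : List Int) (acc : List Int) (i : Nat) (hb : b.length ≤ i)
    (n : Nat) :
    (dekartStep a b)^[n] (acc, (0 : Int), (i : Int)) = (acc, (0 : Int), (i : Int)) := by
  induction n with
  | zero => rfl
  | succ n ih =>
    rw [Function.iterate_succ_apply', ih]
    have h2 : PySem.List.pyGet? b (i : Int) = none := by
      rw [PySem.List.pyGet?_natCast]
      exact List.getElem?_eq_none hb
    unfold dekartStep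
    rcases h1 : PySem.List.pyGet? a (0 : Int) with _ | x <;> simp [h2]

-- phase 1: j climbs from 0 to t while z = i stays put
theorem dk_phase1 (a b : List Int) (acc : List Int) (i : Nat)
    (ha : i < a.length) (hb : i < b.length) :
    ∀ t, t ≤ i →
      (dekartStep a b)^[t] (acc, (0 : Int), (i : Int)) =
        (acc ++ (List.range t).map (fun m => a.getD m 0 * b.getD i 0), (t : Int), (i : Int)) := by
  intro t
  induction t with
  | zero => intro _; simp
  | succ t ih =>
    intro ht
    rw [Function.iterate_succ_apply', ih (by omega)]
    have h1 : PySem.List.pyGet? a (t : Int) = some (a.getD t 0) := by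
      rw [PySem.List.pyGet?_natCast, List.getElem?_eq_getElem (by omega),
        List.getD_eq_getElem a 0 (by omega)]
    have h2 : PySem.List.pyGet? b (i : Int) = some (b.getD i 0) := by
      rw [PySem.List.pyGet?_natCast, List.getElem?_eq_getElem hb,
        List.getD_eq_getElem b 0 hb]
    unfold dekartStep
    have hgt : ((i : Int) > (t : Int)) := by exact_mod_cast (by omega : t < i)
    simp only [hgt, if_pos, h1, h2]
    simp [List.range_succ]

-- phase 2: j = i stays put while z descends from i; after t steps z = i - t
theorem dk_phase2 (a b : List Int) (acc : List Int) (i : Nat)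
    (ha : i < a.length) (hb : i < b.length) :
    ∀ t, t ≤ i + 1 →
      (dekartStep a b)^[t] (acc, (i : Int), (i : Int)) =
        (acc ++ (List.range t).map (fun s => a.getD i 0 * b.getD (i - s) 0),
          (i : Int), (i : Int) - t) := by
  intro t
  induction t with
  | zero => intro _; simp
  | succ t ih =>
    intro ht
    rw [Function.iterate_succ_apply', ih (by omega)]
    have hz : (i : Int) - (t : Int) = ((i - t : Nat) : Int) := by omega
    have h1 : PySem.List.pyGet? a (i : Int) = some (a.getD i 0) := by
      rw [PySem.List.pyGet?_natCast, List.getElem?_eq_getElem ha,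
        List.getD_eq_getElem a 0 ha]
    have h2 : PySem.List.pyGet? b ((i : Int) - (t : Int)) = some (b.getD (i - t) 0) := by
      rw [hz, PySem.List.pyGet?_natCast, List.getElem?_eq_getElem (by omega),
        List.getD_eq_getElem b 0 (by omega)]
    unfold dekartStep
    have hle : ¬ ((i : Int) - (t : Int) > (i : Int)) := by omega
    simp only [hle, h1, h2]
    simp [List.range_succ]
    omega

-- reversed(range n) written as a map
theorem dk_rev_range (n : Nat) :
    (List.range n).reverse = (List.range n).map (fun s => n - 1 - s) := by
  rw [List.range_eq_range', List.reverse_range']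
  simp
  rw [List.range_eq_range']

-- the descending phase-2 list, re-read as corner element + reversed-range list
theorem dk_glue (a b : List Int) (i : Nat) :
    (List.range (i + 1)).map (fun s => a.getD i 0 * b.getD (i - s) 0) =
      a.getD i 0 * b.getD i 0 ::
        ((List.range i).reverse).map (fun k => a.getD i 0 * b.getD k 0) := by
  rw [List.range_succ_eq_map, List.map_cons, dk_rev_range, List.map_map, List.map_map]
  refine congrArg₂ _ (by simp) ?_
  apply List.map_congr_left
  intro s hs
  have := List.mem_range.mp hs
  simp only [Function.comp]
  have hs2 : i - Nat.succ s = i - 1 - s := by omega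
  rw [hs2]

-- what row i contributes in A, for a live row
theorem dk_rowA (a b : List Int) (acc : List Int) (i : Nat)
    (ha : i < a.length) (hb : i < b.length) :
    ((List.range (2 * i + 1)).foldl (fun st _ => dekartStep a b st)
        (acc, (0 : Int), (i : Int))).1 =
      acc ++ (List.range (i + 1)).map (fun m => a.getD m 0 * b.getD i 0)
          ++ ((List.range i).reverse).map (fun k => a.getD i 0 * b.getD k 0) := by
  rw [dk_foldl_const, List.length_range]
  have hsplit : 2 * i + 1 = (i + 1) + i := by omega
  rw [hsplit, Function.iterate_add_apply, dk_phase1 a b acc i ha hb i (le_refl i),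
    dk_phase2 a b _ i ha hb (i + 1) (le_refl _)]
  rw [dk_glue, List.range_succ, List.map_append]
  simp [List.append_assoc]

-- per-row contribution of A as acc ++ g i
theorem dk_row_all (a b : List Int) (acc : List Int) (i : Nat) (ha : i < a.length) :
    ((List.range (2 * i + 1)).foldl (fun st _ => dekartStep a b st)
        (acc, (0 : Int), (i : Int))).1 =
      acc ++ (if i < b.length then
          (List.range (i + 1)).map (fun m => a.getD m 0 * b.getD i 0)
            ++ ((List.range i).reverse).map (fun k => a.getD i 0 * b.getD k 0)
        else []) := by
  by_cases hb : i < b.length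
  · rw [dk_rowA a b acc i ha hb]
    simp [hb, List.append_assoc]
  · rw [dk_foldl_const, List.length_range, dk_frozen a b acc i (by omega)]
    simp [hb]

-- ranks of shell i, in emission order, are exactly i*i, i*i+1, …, i*i+2i
-- dkStep on a shell-q position q*q + p with 1 ≤ p ≤ 2*q: no shell bump, emit dkEmit
theorem dk_step_mid (a b : List Int) (acc : List Int) (q p : Nat)
    (h1 : 1 ≤ p) (h2 : p ≤ 2 * q) :
    dkStep a b (acc, q, (q + 1) * (q + 1)) (q * q + p) =
      (acc ++ [dkEmit a b q p], q, (q + 1) * (q + 1)) := by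
  have hno : ¬ (q * q + p = (q + 1) * (q + 1)) := by nlinarith
  by_cases hp : p ≤ q
  · have hc : q * q + p - q * q = p := by omega
    simp [dkStep, dkEmit, hno, hc, hp, PySem.List.pyGetD_natCast, List.getD]
  · have hc : q * q + p - q * q = p := by omega
    simp [dkStep, dkEmit, hno, hc, hp, PySem.List.pyGetD_natCast, List.getD]

-- the interior of shell q: a run of positions 1 ≤ p ≤ 2*q from state (acc, q)
theorem dk_shell_run (a b : List Int) (q : Nat) :
    ∀ (l : List Nat) (acc : List Int), (∀ p ∈ l, 1 ≤ p ∧ p ≤ 2 * q) →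
      (l.map (fun p => q * q + p)).foldl (dkStep a b) (acc, q, (q + 1) * (q + 1)) =
        (acc ++ l.map (dkEmit a b q), q, (q + 1) * (q + 1)) := by
  intro l
  induction l with
  | nil => intro acc _; simp
  | cons p ps ih =>
    intro acc h
    have hp := h p List.mem_cons_self
    rw [List.map_cons, List.foldl_cons, dk_step_mid a b acc q p hp.1 hp.2,
      ih _ (fun x hx => h x (List.mem_cons_of_mem p hx))]
    simp [List.append_assoc]

-- the first position q*q of shell q bumps the shell counter (except at q = 0,
-- where there is nothing to bump) and emits the corner-column product
theorem dk_step_first (a b : List Int) (acc : List Int) (q : Nat) :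
    dkStep a b (acc, q - 1, max (q * q) 1) (q * q) =
      (acc ++ [dkEmit a b q 0], q, (q + 1) * (q + 1)) := by
  rcases Nat.eq_zero_or_pos q with hq | hq
  · subst hq
    simp [dkStep, dkEmit, PySem.List.pyGetD_zero, List.getD]
  · have hm : max (q * q) 1 = q * q := by
      have : 1 ≤ q * q := by nlinarith
      omega
    have h1 : q - 1 + 1 = q := by omega
    rw [hm]
    simp [dkStep, dkEmit, h1, PySem.List.pyGetD_zero, PySem.List.pyGetD_natCast, List.getD]

-- one whole shell: positions q*q … q*q + 2*q from state (acc, q-1)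
theorem dk_shell (a b : List Int) (acc : List Int) (q : Nat) :
    ((List.range (2 * q + 1)).map (fun p => q * q + p)).foldl (dkStep a b)
        (acc, q - 1, max (q * q) 1) =
      (acc ++ (List.range (2 * q + 1)).map (dkEmit a b q), q, (q + 1) * (q + 1)) := by
  have hr : List.range (2 * q + 1) = 0 :: (List.range (2 * q)).map (fun p => p + 1) := by
    rw [List.range_succ_eq_map]
  rw [hr, List.map_cons, List.foldl_cons, List.map_map]
  have h0 : q * q + 0 = q * q := by omega
  rw [h0, dk_step_first a b acc q]
  have := dk_shell_run a b q ((List.range (2 * q)).map (fun p => p + 1))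
    (acc ++ [dkEmit a b q 0])
    (by intro p hp; rcases List.mem_map.mp hp with ⟨t, ht, rfl⟩
        have := List.mem_range.mp ht; omega)
  rw [List.map_map] at this
  rw [this, List.map_cons, List.map_map]
  simp

-- the emissions of shell q, read back as A's two legs
theorem dk_emit_legs (a b : List Int) (q : Nat) :
    (List.range (2 * q + 1)).map (dkEmit a b q) = dkLegs a b q := by
  rw [dkLegs]
  have hr : List.range (2 * q + 1) = List.range (q + 1) ++ (List.range q).map (fun t => (q + 1) + t) := by
    rw [show 2 * q + 1 = (q + 1) + q from by omega, List.range_add]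
  rw [hr, List.map_append, List.map_map]
  refine congrArg₂ _ ?_ ?_
  · apply List.map_congr_left
    intro m hm
    have := List.mem_range.mp hm
    simp [dkEmit, (by omega : m ≤ q)]
  · rw [dk_rev_range, List.map_map]
    apply List.map_congr_left
    intro s hs
    have := List.mem_range.mp hs
    simp only [Function.comp, dkEmit]
    have h2 : ¬ (q + 1 + s ≤ q) := by omega
    have h3 : 2 * q - (q + 1 + s) = q - 1 - s := by omega
    simp [h2, h3]

-- B's flat loop over the first q*q counters = the first q shells
theorem dk_flat (a b : List Int) (q : Nat) :
    (List.range (q * q)).foldl (dkStep a b) ([], 0, 1) =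
      ((List.range q).flatMap (dkLegs a b), q - 1, max (q * q) 1) := by
  induction q with
  | zero => simp
  | succ q ih =>
    have hr : List.range ((q + 1) * (q + 1)) =
        List.range (q * q) ++ (List.range (2 * q + 1)).map (fun p => q * q + p) := by
      rw [show (q + 1) * (q + 1) = q * q + (2 * q + 1) from by ring, List.range_add]
    rw [hr, List.foldl_append, ih, dk_shell a b _ q, dk_emit_legs]
    rw [List.range_succ, List.flatMap_append]
    simp

-- ===== VERDICT (by name: the statement is the Claim_ definition above) =====
theorem dekart_mul_spec : Claim_equal_dekart_mul := by
  intro a b _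
  unfold Spec_dekart_mul dekart_mul dekart_mul_alt
  have hA : (List.range a.length).foldl (fun acc i =>
      ((List.range (2 * i + 1)).foldl (fun st _ => dekartStep a b st)
        (acc, (0 : Int), (i : Int))).1) [] =
    (List.range a.length).foldl (fun acc i =>
      acc ++ (if i < b.length then
          (List.range (i + 1)).map (fun m => a.getD m 0 * b.getD i 0)
            ++ ((List.range i).reverse).map (fun k => a.getD i 0 * b.getD k 0)
        else [])) [] := by
    exact dk_foldl_congr _ _ _ _ (fun acc i hi => dk_row_all a b acc i (List.mem_range.mp hi))
  rw [hA]
  rw [dk_flat a b (min a.length b.length)]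
  -- A side: foldl-append is a flatMap; rows past min contribute nothing
  rw [PySem.List.foldl_append_eq_flatMap]
  have hsplitA : List.range a.length = List.range (min a.length b.length) ++
      (List.range (a.length - min a.length b.length)).map (fun i => min a.length b.length + i) := by
    rw [← List.range_add]; congr 1; omega
  rw [hsplitA, List.flatMap_append]
  have h1 : (List.range (min a.length b.length)).flatMap (fun i =>
      if i < b.length then
          (List.range (i + 1)).map (fun m => a.getD m 0 * b.getD i 0)
            ++ ((List.range i).reverse).map (fun k => a.getD i 0 * b.getD k 0)
        else []) =
      (List.range (min a.length b.length)).flatMap (fun i =>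
          (List.range (i + 1)).map (fun m => a.getD m 0 * b.getD i 0)
            ++ ((List.range i).reverse).map (fun k => a.getD i 0 * b.getD k 0)) := by
    apply dk_flatMap_congr
    intro i hi
    have : i < b.length := by
      have := List.mem_range.mp hi; omega
    simp [this]
  have h2 : ((List.range (a.length - min a.length b.length)).map
      (fun i => min a.length b.length + i)).flatMap (fun i =>
      if i < b.length then
          (List.range (i + 1)).map (fun m => a.getD m 0 * b.getD i 0)
            ++ ((List.range i).reverse).map (fun k => a.getD i 0 * b.getD k 0)
        else []) = [] := by
    rw [List.flatMap_eq_nil_iff]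
    intro i hi
    rcases List.mem_map.mp hi with ⟨t, ht, rfl⟩
    have hcase : ¬ (min a.length b.length + t < b.length) := by
      have := List.mem_range.mp ht; omega
    simp [hcase]
  rw [h1, h2, List.append_nil, List.nil_append]
  exact dk_flatMap_congr _ _ _ (fun i _ => by rw [dkLegs])
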